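-- pv_equiv track=rewrite | github.com/xiabofei/python_details | nlp/utils/prepare_utils.py | negative_positive
-- ===== SOURCE A (Python) =====
-- def negative_positive(content):
--     _symbol_word = [
--         ('(-)', '阴性'),
--         ('(+)', '阳性'),
--     ]
--     for i in _symbol_word:
--         content = content.replace(i[0], i[1])
--     return content
-- ===== SOURCE B (Python) =====
-- def negative_positive(content):
--     # one left-to-right scan over the string instead of two full replace passes
--     out = []
--     i = 0
--     n = len(content)
--     while i < n:
--         if i + 2 < n and content[i] == '(' and content[i + 2] == ')' and content[i + 1] in '-+':
--             out.append('阴性' if content[i + 1] == '-' else '阳性')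
--             i += 3
--         else:
--             out.append(content[i])
--             i += 1
--     return ''.join(out)
-- ===== Notes on version B (the rewrite author's own statement) =====
-- stated objective: alternative
-- what changed: Replaces A's two sequential full replace passes ('(-)' then '(+)') by a single left-to-right scan that recognises either marker with a three-character lookahead and emits the corresponding word; since replacements contain no marker characters and the markers cannot overlap, one pass gives the same result.
import Mathlib
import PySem

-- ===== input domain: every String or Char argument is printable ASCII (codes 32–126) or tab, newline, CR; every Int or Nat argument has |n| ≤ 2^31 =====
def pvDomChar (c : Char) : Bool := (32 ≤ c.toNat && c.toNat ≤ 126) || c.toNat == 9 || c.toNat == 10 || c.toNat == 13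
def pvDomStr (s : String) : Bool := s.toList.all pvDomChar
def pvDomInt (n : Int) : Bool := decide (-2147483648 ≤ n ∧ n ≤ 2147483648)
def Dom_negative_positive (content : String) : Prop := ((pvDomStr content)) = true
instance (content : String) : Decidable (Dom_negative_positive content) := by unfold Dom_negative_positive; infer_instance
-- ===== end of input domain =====

-- B replaces A's two sequential str.replace passes by one left-to-right scan that dispatches per marker (objective: alternative).

-- ===== PORT A =====
def negative_positive (content : String) : String :=
  -- for i in _symbol_word: content = content.replace(i[0], i[1])
  let content := PySem.Str.replace content "(-)" "阴性"
  let content := PySem.Str.replace content "(+)" "阳性"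
  content

-- ===== PORT B =====
-- B's while-loop: one scan over the characters with a three-char lookahead, as the obvious structural recursion
def npScan : List Char → List Char
  | '(' :: '-' :: ')' :: rest => '阴' :: '性' :: npScan rest
  | '(' :: '+' :: ')' :: rest => '阳' :: '性' :: npScan rest
  | c :: rest => c :: npScan rest
  | [] => []

def negative_positive_alt (content : String) : String :=
  String.ofList (npScan content.toList)

-- ===== PRECONDITION & SPEC =====
def Spec_negative_positive (content : String) (out : String) : Prop := out = negative_positive_alt content
instance (content : String) (out : String) : Decidable (Spec_negative_positive content out) := by unfold Spec_negative_positive; infer_instance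

-- ===== CLAIM (what is proved, stated in full; the proofs are below) =====
def Claim_equal_negative_positive : Prop := ∀ (content : String), Dom_negative_positive content → Spec_negative_positive content (negative_positive content)

-- ===== LEMMAS AND PROOFS =====

-- structural characterisation of content.replace('(-)', '阴性')
def rA1 : List Char → List Char
  | '(' :: '-' :: ')' :: t => '阴' :: '性' :: rA1 t
  | c :: t => c :: rA1 t
  | [] => []

-- structural characterisation of content.replace('(+)', '阳性')
def rA2 : List Char → List Char
  | '(' :: '+' :: ')' :: t => '阳' :: '性' :: rA2 t
  | c :: t => c :: rA2 t
  | [] => []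

lemma rA1_cons_of (a : Char) (t : List Char) (h : ¬ List.isPrefixOf ['(', '-', ')'] (a :: t) = true) :
    rA1 (a :: t) = a :: rA1 t := by
  rw [rA1.eq_def]
  split
  · rename_i u heq
    exfalso
    injection heq with h1 h2
    subst h1; subst h2
    exact h (by simp [List.isPrefixOf])
  · rename_i x c u hne heq
    injection heq with h1 h2
    subst h1; subst h2
    rfl
  · rename_i x heq
    cases heq

lemma rA2_cons_of (a : Char) (t : List Char) (h : ¬ List.isPrefixOf ['(', '+', ')'] (a :: t) = true) :
    rA2 (a :: t) = a :: rA2 t := by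
  rw [rA2.eq_def]
  split
  · rename_i u heq
    exfalso
    injection heq with h1 h2
    subst h1; subst h2
    exact h (by simp [List.isPrefixOf])
  · rename_i x c u hne heq
    injection heq with h1 h2
    subst h1; subst h2
    rfl
  · rename_i x heq
    cases heq

lemma npScan_cons_of (c : Char) (t : List Char)
    (h1 : ∀ rest, c = '(' → t = '-' :: ')' :: rest → False)
    (h2 : ∀ rest, c = '(' → t = '+' :: ')' :: rest → False) :
    npScan (c :: t) = c :: npScan t := by
  rw [npScan.eq_def]
  split
  · rename_i u heq
    exfalso
    injection heq with e1 e2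
    exact h1 u e1 e2
  · rename_i u heq
    exfalso
    injection heq with e1 e2
    exact h2 u e1 e2
  · rename_i x d u hne1 hne2 heq
    injection heq with e1 e2
    subst e1; subst e2
    rfl
  · rename_i x heq
    cases heq

lemma go1 : ∀ (fuel : Nat) (l acc : List Char), l.length ≤ fuel →
    PySem.Chars.replace.go ['(', '-', ')'] ['阴', '性'] fuel l acc = acc.reverse ++ rA1 l := by
  intro fuel
  induction fuel with
  | zero =>
    intro l acc h
    have : l = [] := List.eq_nil_of_length_eq_zero (Nat.le_zero.mp h)
    subst this
    simp [PySem.Chars.replace.go, rA1]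
  | succ n ih =>
    intro l acc h
    match l with
    | [] => simp [PySem.Chars.replace.go, rA1]
    | a :: t =>
      rw [PySem.Chars.replace.go]
      by_cases hp : List.isPrefixOf ['(', '-', ')'] (a :: t) = true
      · simp only [hp, if_true]
        obtain ⟨s, hs⟩ := List.isPrefixOf_iff_prefix.mp hp
        simp only [List.cons_append, List.nil_append, List.cons.injEq] at hs
        obtain ⟨rfl, rfl⟩ := hs
        have hd : List.drop (['(', '-', ')'] : List Char).length ('(' :: '-' :: ')' :: s) = s := rfl
        rw [hd, ih s (['阴', '性'].reverse ++ acc) (by simp at h ⊢; omega)]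
        simp [rA1]
      · simp only [hp, Bool.false_eq_true, if_false]
        rw [ih t (a :: acc) (by simpa using Nat.le_of_succ_le_succ h), rA1_cons_of a t hp]
        simp

lemma go2 : ∀ (fuel : Nat) (l acc : List Char), l.length ≤ fuel →
    PySem.Chars.replace.go ['(', '+', ')'] ['阳', '性'] fuel l acc = acc.reverse ++ rA2 l := by
  intro fuel
  induction fuel with
  | zero =>
    intro l acc h
    have : l = [] := List.eq_nil_of_length_eq_zero (Nat.le_zero.mp h)
    subst this
    simp [PySem.Chars.replace.go, rA2]
  | succ n ih =>
    intro l acc h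
    match l with
    | [] => simp [PySem.Chars.replace.go, rA2]
    | a :: t =>
      rw [PySem.Chars.replace.go]
      by_cases hp : List.isPrefixOf ['(', '+', ')'] (a :: t) = true
      · simp only [hp, if_true]
        obtain ⟨s, hs⟩ := List.isPrefixOf_iff_prefix.mp hp
        simp only [List.cons_append, List.nil_append, List.cons.injEq] at hs
        obtain ⟨rfl, rfl⟩ := hs
        have hd : List.drop (['(', '+', ')'] : List Char).length ('(' :: '+' :: ')' :: s) = s := rfl
        rw [hd, ih s (['阳', '性'].reverse ++ acc) (by simp at h ⊢; omega)]
        simp [rA2]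
      · simp only [hp, Bool.false_eq_true, if_false]
        rw [ih t (a :: acc) (by simpa using Nat.le_of_succ_le_succ h), rA2_cons_of a t hp]
        simp

lemma replace1 (l : List Char) : PySem.Chars.replace l ['(', '-', ')'] ['阴', '性'] = rA1 l := by
  rw [PySem.Chars.replace]
  simp [go1 l.length l [] le_rfl]

lemma replace2 (l : List Char) : PySem.Chars.replace l ['(', '+', ')'] ['阳', '性'] = rA2 l := by
  rw [PySem.Chars.replace]
  simp [go2 l.length l [] le_rfl]

-- the first pass cannot manufacture or expose a '+)' continuation that was not in the input
lemma rA1_pp : ∀ (t u : List Char), rA1 t = '+' :: ')' :: u → ∃ v, t = '+' :: ')' :: v := by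
  intro t u h
  match t with
  | [] => simp [rA1] at h
  | a :: s =>
    by_cases hp : List.isPrefixOf ['(', '-', ')'] (a :: s) = true
    · obtain ⟨w, hw⟩ := List.isPrefixOf_iff_prefix.mp hp
      simp only [List.cons_append, List.nil_append, List.cons.injEq] at hw
      obtain ⟨rfl, rfl⟩ := hw
      rw [show rA1 ('(' :: '-' :: ')' :: w) = '阴' :: '性' :: rA1 w from by simp [rA1]] at h
      injection h with hh _
      exact absurd hh (by decide)
    · rw [rA1_cons_of a s hp] at h
      injection h with h1 h2
      subst h1
      match s with
      | [] => simp [rA1] at h2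
      | b :: s2 =>
        by_cases hp2 : List.isPrefixOf ['(', '-', ')'] (b :: s2) = true
        · obtain ⟨w, hw⟩ := List.isPrefixOf_iff_prefix.mp hp2
          simp only [List.cons_append, List.nil_append, List.cons.injEq] at hw
          obtain ⟨rfl, rfl⟩ := hw
          rw [show rA1 ('(' :: '-' :: ')' :: w) = '阴' :: '性' :: rA1 w from by simp [rA1]] at h2
          injection h2 with hh _
          exact absurd hh (by decide)
        · rw [rA1_cons_of b s2 hp2] at h2
          injection h2 with h3 h4
          subst h3
          exact ⟨s2, rfl⟩

lemma main_eq : ∀ (l : List Char), rA2 (rA1 l) = npScan l := by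
  intro l
  induction l using npScan.induct with
  | case1 t ih =>
    rw [show rA1 ('(' :: '-' :: ')' :: t) = '阴' :: '性' :: rA1 t from by simp [rA1]]
    rw [rA2_cons_of '阴' _ (by simp [List.isPrefixOf]), rA2_cons_of '性' _ (by simp [List.isPrefixOf]), ih]
    simp [npScan]
  | case2 t ih =>
    rw [rA1_cons_of _ _ (by simp [List.isPrefixOf]), rA1_cons_of _ _ (by simp [List.isPrefixOf]),
        rA1_cons_of _ _ (by simp [List.isPrefixOf])]
    rw [show rA2 ('(' :: '+' :: ')' :: rA1 t) = '阳' :: '性' :: rA2 (rA1 t) from by simp [rA2], ih]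
    simp [npScan]
  | case3 c t h1 h2 ih =>
    have hnp : ¬ List.isPrefixOf ['(', '-', ')'] (c :: t) = true := by
      intro hp
      obtain ⟨w, hw⟩ := List.isPrefixOf_iff_prefix.mp hp
      simp only [List.cons_append, List.nil_append, List.cons.injEq] at hw
      exact h1 w hw.1.symm hw.2.symm
    rw [rA1_cons_of c t hnp]
    have hnp2 : ¬ List.isPrefixOf ['(', '+', ')'] (c :: rA1 t) = true := by
      intro hp
      obtain ⟨w, hw⟩ := List.isPrefixOf_iff_prefix.mp hp
      simp only [List.cons_append, List.nil_append, List.cons.injEq] at hw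
      obtain ⟨v, hv⟩ := rA1_pp t w hw.2.symm
      exact h2 v hw.1.symm hv
    rw [rA2_cons_of c _ hnp2, ih, npScan_cons_of c t h1 h2]
  | case4 => simp [rA1, rA2, npScan]

-- ===== VERDICT (by name: the statement is the Claim_ definition above) =====
theorem negative_positive_spec : Claim_equal_negative_positive := by
  intro content _
  unfold Spec_negative_positive negative_positive negative_positive_alt
  unfold PySem.Str.replace
  apply congrArg String.ofList
  rw [show ("(-)" : String).toList = ['(', '-', ')'] from rfl,
      show ("(+)" : String).toList = ['(', '+', ')'] from rfl,
      show ("阴性" : String).toList = ['阴', '性'] from rfl,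
      show ("阳性" : String).toList = ['阳', '性'] from rfl]
  rw [replace1]
  rw [show (String.ofList (rA1 content.toList)).toList = rA1 content.toList from by simp]
  rw [replace2, main_eq]
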